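-- pv_equiv track=rewrite | github.com/Kaanhehe/school-manager | main.py | sort_timetable_data
-- ===== SOURCE A (Python) =====
-- from itertools import groupby
-- from operator import itemgetter
--
-- def sort_timetable_data(timetable_data) -> list:
--     # Define the weekday mapping
--     weekday_mapping = {
--         'Montag': 1,
--         'Dienstag': 2,
--         'Mittwoch': 3,
--         'Donnerstag': 4,
--         'Freitag': 5
--     }
--     # Reverse mapping for converting numbers back to weekdays
--     reverse_mapping = {v: k for k, v in weekday_mapping.items()}
--
--     # Convert weekdays to numbers and remove user_id
--     timetable_data = [(weekday_mapping[entry[1]], *entry[2:]) for entry in timetable_data]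
--
--     # Sort by class_num and then by class_day
--     timetable_data.sort(key=itemgetter(1, 0))
--
--     # Group the data by class_num
--     grouped_data = []
--     for key, group in groupby(timetable_data, key=itemgetter(1)):
--         # Convert the weekdays back to their original names
--         group = [(reverse_mapping[g[0]], *g[1:]) for g in group]
--         # check if there is every weekday in the group
--         if len(group) < 5:
--             # get the missing weekdays
--             missing_days = set(weekday_mapping.keys()) - set([entry[0] for entry in group])
--             # add the missing weekdays to the group
--             for day in missing_days:
--                 group.append((day, key, "", "", "", "", ""))
--             # Sort the group by weekday
--             group.sort(key=lambda x: weekday_mapping[x[0]])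
--         grouped_data.append(group)
--
--     return grouped_data
-- ===== SOURCE B (Python) =====
-- def sort_timetable_data(timetable_data) -> list:
--     weekday_mapping = {
--         'Montag': 1,
--         'Dienstag': 2,
--         'Mittwoch': 3,
--         'Donnerstag': 4,
--         'Freitag': 5
--     }
--     # Group rows by class number in one pass.
--     groups = {}
--     for entry in timetable_data:
--         groups.setdefault(entry[2], []).append((entry[1],) + tuple(entry[2:]))
--     # Emit classes in ascending order; fill in any missing weekdays, then
--     # order each class's rows Monday..Friday.
--     result = []
--     for class_num in sorted(groups):
--         rows = groups[class_num]
--         if len(rows) < 5: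
--             present = {row[0] for row in rows}
--             for day in weekday_mapping:
--                 if day not in present:
--                     rows.append((day, class_num, "", "", "", "", ""))
--         rows.sort(key=lambda r: weekday_mapping[r[0]])
--         result.append(rows)
--     return result
-- ===== Notes on version B (the rewrite author's own statement) =====
-- stated objective: alternative
-- what changed: Replaces A's convert-all / global sort by (class, day) / itertools.groupby pipeline with a single-pass hash grouping by class (dict of lists), iterating sorted class keys and filling/sorting each group independently; Pre_ excludes entries whose weekday name is not one of the five mapped names, on which both programs raise KeyError.
import Mathlib
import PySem

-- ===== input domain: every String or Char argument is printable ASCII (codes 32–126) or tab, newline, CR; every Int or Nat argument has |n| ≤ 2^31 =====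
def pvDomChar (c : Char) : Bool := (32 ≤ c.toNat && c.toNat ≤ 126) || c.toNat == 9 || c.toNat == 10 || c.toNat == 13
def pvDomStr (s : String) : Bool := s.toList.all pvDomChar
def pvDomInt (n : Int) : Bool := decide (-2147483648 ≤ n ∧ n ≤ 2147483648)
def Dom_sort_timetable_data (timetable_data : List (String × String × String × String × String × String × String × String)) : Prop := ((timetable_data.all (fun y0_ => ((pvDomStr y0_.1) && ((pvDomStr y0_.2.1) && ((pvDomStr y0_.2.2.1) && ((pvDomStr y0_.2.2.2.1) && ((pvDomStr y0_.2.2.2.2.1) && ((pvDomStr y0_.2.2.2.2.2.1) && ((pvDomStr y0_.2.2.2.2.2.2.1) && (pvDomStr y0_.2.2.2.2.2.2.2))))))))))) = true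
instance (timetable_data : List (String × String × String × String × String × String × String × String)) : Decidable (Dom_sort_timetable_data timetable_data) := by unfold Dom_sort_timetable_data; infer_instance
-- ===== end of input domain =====

-- B replaces A's convert-all / global sort by (class, day) / itertools.groupby pipeline with a
-- single-pass hash grouping by class and a per-group fill-and-sort (objective: alternative).

-- ===== PORT A =====
-- weekday_mapping (module-constant table shared by both ports; each Python copy is this literal dict)
def pvWm : PySem.Dict String Int :=
  PySem.Dict.ofList [("Montag",1),("Dienstag",2),("Mittwoch",3),("Donnerstag",4),("Freitag",5)]

-- reverse_mapping = {v: k for k, v in weekday_mapping.items()}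
def pvRm : PySem.Dict Int String :=
  PySem.Dict.ofList (pvWm.items.map (fun p => (p.2, p.1)))

-- itertools.groupby(xs, key=itemgetter(1)) for the converted rows: consecutive runs with equal class
def pvRuns (xs : List (Int × String × String × String × String × String × String)) :
    List (String × List (Int × String × String × String × String × String × String)) :=
  match xs with
  | [] => []
  | x :: rest =>
    (x.2.1, x :: rest.takeWhile (fun y => y.2.1 == x.2.1)) ::
      pvRuns (rest.dropWhile (fun y => y.2.1 == x.2.1))
  termination_by xs.length
  decreasing_by
    simpa using Nat.lt_succ_of_le (List.length_dropWhile_le _ _)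

-- the loop body of A's groupby loop (reverse-map the day numbers, fill a short group, re-sort it).
-- A iterates over the Python SET missing_days; the port iterates it in PySem.Set order — the group
-- is sorted by weekday right after, so the resulting group is the same list as Python produces.
def pvFinishA (key : String) (grp0 : List (Int × String × String × String × String × String × String)) :
    List (String × String × String × String × String × String × String) :=
  let grp := grp0.map (fun g => (pvRm.getD g.1 "", g.2))
  if grp.length < 5 then
    let missing := PySem.Set.diff (PySem.Set.ofList pvWm.keys) (PySem.Set.ofList (grp.map (fun e => e.1)))
    let grp2 := missing.foldl (fun acc day => acc ++ [(day, key, "", "", "", "", "")]) grp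
    PySem.List.sorted grp2 (fun x => pvWm.getD x.1 0) false
  else grp

def sort_timetable_data (timetable_data : List (String × String × String × String × String × String × String × String)) : List (List (String × String × String × String × String × String × String)) :=
  -- timetable_data = [(weekday_mapping[entry[1]], *entry[2:]) for entry in timetable_data]
  -- (weekday_mapping[entry[1]] raises KeyError on an unknown weekday: excluded by Pre_; getD 0 there)
  let conv := timetable_data.map (fun e => (pvWm.getD e.2.1 0, e.2.2))
  -- timetable_data.sort(key=itemgetter(1, 0))
  let s := PySem.List.sorted2 conv (fun x => x.2.1) (fun x => x.1) false
  -- for key, group in groupby(...): ... grouped_data.append(group)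
  (pvRuns s).foldl (fun acc kg => acc ++ [pvFinishA kg.1 kg.2]) []

-- ===== PORT B =====
def sort_timetable_data_alt (timetable_data : List (String × String × String × String × String × String × String × String)) : List (List (String × String × String × String × String × String × String)) :=
  -- groups.setdefault(entry[2], []).append((entry[1],) + tuple(entry[2:]))
  let groups := timetable_data.foldl
    (fun d e => d.modify e.2.2.1 [] (fun l => l ++ [(e.2.1, e.2.2)])) PySem.Dict.empty
  -- for class_num in sorted(groups): ...
  (PySem.List.sorted groups.keys (fun k => k) false).foldl (fun res c =>
    let rows := groups.getD c []
    let rows2 :=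
      if rows.length < 5 then
        let present := PySem.Set.ofList (rows.map (fun r => r.1))
        -- for day in weekday_mapping: if day not in present: rows.append((day, class_num, "", "", "", "", ""))
        pvWm.keys.foldl
          (fun acc day => if PySem.Set.contains present day then acc
                          else acc ++ [(day, c, "", "", "", "", "")]) rows
      else rows
    -- rows.sort(key=lambda r: weekday_mapping[r[0]])
    -- (weekday_mapping[r[0]] raises KeyError on an unknown weekday: excluded by Pre_; getD 0 there)
    res ++ [PySem.List.sorted rows2 (fun r => pvWm.getD r.1 0) false]) []

-- ===== PRECONDITION & SPEC =====
-- Pre_ excludes exactly the entries whose weekday name is not one of the five mapped names: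
-- there both Pythons raise KeyError (A at weekday_mapping[entry[1]], B at the per-group sort key).
def Pre_sort_timetable_data (timetable_data : List (String × String × String × String × String × String × String × String)) : Prop :=
  ∀ e ∈ timetable_data,
    e.2.1 = "Montag" ∨ e.2.1 = "Dienstag" ∨ e.2.1 = "Mittwoch" ∨ e.2.1 = "Donnerstag" ∨ e.2.1 = "Freitag"
instance (timetable_data : List (String × String × String × String × String × String × String × String)) : Decidable (Pre_sort_timetable_data timetable_data) := by unfold Pre_sort_timetable_data; infer_instance

def pvWitness_sort_timetable_data : (List (String × String × String × String × String × String × String × String)) :=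
  [("7", "Montag", "1a", "Mathe", "8:00", "9:00", "R1", "Herr M"),
   ("7", "Mittwoch", "1a", "Bio", "8:00", "9:00", "R2", "Frau B"),
   ("3", "Montag", "2b", "Kunst", "9:00", "10:00", "R3", "Frau K")]

def Spec_sort_timetable_data (timetable_data : List (String × String × String × String × String × String × String × String)) (out : List (List (String × String × String × String × String × String × String))) : Prop := out = sort_timetable_data_alt timetable_data
-- instance search does not assemble DecidableEq for the deeply nested result type by itself;
-- these composed instances are used only by the Decidable instance for Spec_ below.
def pvDE4 : DecidableEq (String × String × String × String) := inferInstance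
def pvDE5 : DecidableEq (String × String × String × String × String) := @instDecidableEqProd _ _ _ pvDE4
def pvDE6 : DecidableEq (String × String × String × String × String × String) := @instDecidableEqProd _ _ _ pvDE5
def pvDE7 : DecidableEq (String × String × String × String × String × String × String) := @instDecidableEqProd _ _ _ pvDE6
def pvDEL : DecidableEq (List (String × String × String × String × String × String × String)) := @instDecidableEqList _ pvDE7
def pvDELL : DecidableEq (List (List (String × String × String × String × String × String × String))) := @instDecidableEqList _ pvDEL
instance (timetable_data : List (String × String × String × String × String × String × String × String)) (out : List (List (String × String × String × String × String × String × String))) : Decidable (Spec_sort_timetable_data timetable_data out) := by unfold Spec_sort_timetable_data; exact pvDELL out (sort_timetable_data_alt timetable_data)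

-- ===== CLAIM (what is proved, stated in full; the proofs are below) =====
def Claim_equal_sort_timetable_data : Prop := ∀ (timetable_data : List (String × String × String × String × String × String × String × String)), Dom_sort_timetable_data timetable_data → Pre_sort_timetable_data timetable_data → Spec_sort_timetable_data timetable_data (sort_timetable_data timetable_data)

-- ===== LEMMAS AND PROOFS =====

theorem pv_insertBy_append {α : Type} (b : α → α → Bool) (x : α) (B R : List α) :
    PySem.List.insertBy b x (B ++ R) =
      if B.all (fun y => !b x y) then B ++ PySem.List.insertBy b x R
      else PySem.List.insertBy b x B ++ R := by
  induction B with
  | nil => simp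
  | cons y ys ih =>
    by_cases h : b x y
    · simp [PySem.List.insertBy, h]
    · simp [PySem.List.insertBy, h, ih]
      split_ifs <;> simp

theorem pv_insertBy_congr {α : Type} (b b' : α → α → Bool) (x : α) (ys : List α)
    (h : ∀ y ∈ ys, b x y = b' x y) :
    PySem.List.insertBy b x ys = PySem.List.insertBy b' x ys := by
  induction ys with
  | nil => rfl
  | cons y ys ih =>
    have hy := h y (by simp)
    by_cases hb : b x y
    · simp [PySem.List.insertBy, hb, hy ▸ hb]
    · have : b' x y = false := by rw [← hy]; simpa using hb
      simp [PySem.List.insertBy, hb, this, ih (fun z hz => h z (by simp [hz]))]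

theorem pv_ins_mem {α K1 K2 : Type} [LinearOrder K1] [LinearOrder K2]
    (k1 : α → K1) (k2 : α → K2) (x : α) (cs : List K1) (g : K1 → List α)
    (hp : cs.Pairwise (· < ·))
    (hk : ∀ c ∈ cs, ∀ y ∈ g c, k1 y = c)
    (hc : k1 x ∈ cs) :
    PySem.List.insertBy
        (fun a b => decide (k1 a < k1 b) || (!decide (k1 b < k1 a) && decide (k2 a < k2 b)))
        x (cs.flatMap g)
      = cs.flatMap (fun c' =>
          if c' = k1 x then PySem.List.insertBy (fun a b => decide (k2 a < k2 b)) x (g c')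
          else g c') := by
  induction cs with
  | nil => simp at hc
  | cons c0 cs' ih =>
    have hlt : ∀ c' ∈ cs', c0 < c' := (List.pairwise_cons.1 hp).1
    have hp' := (List.pairwise_cons.1 hp).2
    rw [List.flatMap_cons, List.flatMap_cons, pv_insertBy_append]
    by_cases hx : c0 = k1 x
    · -- insertion belongs to block c0
      have hb2 : ∀ y ∈ g c0,
          (decide (k1 x < k1 y) || (!decide (k1 y < k1 x) && decide (k2 x < k2 y)))
            = decide (k2 x < k2 y) := by
        intro y hy
        have : k1 y = k1 x := by rw [hk c0 (by simp) y hy, hx]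
        simp [this]
      have hR : ∀ y ∈ cs'.flatMap g,
          (decide (k1 x < k1 y) || (!decide (k1 y < k1 x) && decide (k2 x < k2 y))) = true := by
        intro y hy
        obtain ⟨c', hc', hyg⟩ := List.mem_flatMap.1 hy
        have h1 : k1 y = c' := hk c' (by simp [hc']) y hyg
        have h2 : k1 x < k1 y := by rw [h1, ← hx]; exact hlt c' hc'
        simp [h2]
      have hrest : cs'.flatMap (fun c' =>
          if c' = k1 x then PySem.List.insertBy (fun a b => decide (k2 a < k2 b)) x (g c')
          else g c') = cs'.flatMap g := by
        apply List.flatMap_congr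
        intro c' hc'
        have : c' ≠ k1 x := by rw [← hx]; exact (hlt c' hc').ne'
        simp [this]
      rw [hrest, if_pos hx]
      by_cases hall : ∀ y ∈ g c0, ¬ k2 x < k2 y
      · have hallT : ((g c0).all fun y => !(decide (k1 x < k1 y) || (!decide (k1 y < k1 x) && decide (k2 x < k2 y)))) = true := by
          apply List.all_eq_true.2
          intro y hy
          rw [hb2 y hy]
          simpa using hall y hy
        rw [if_pos hallT]
        have hallb : ∀ y ∈ g c0, decide (k2 x < k2 y) = false := fun y hy => by
          simpa using hall y hy
        rw [PySem.List.insertBy_of_forall_not_before (fun a b => decide (k2 a < k2 b)) x (g c0) hallb]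
        cases hRnil : cs'.flatMap g with
        | nil => simp [PySem.List.insertBy]
        | cons h t =>
          have : (decide (k1 x < k1 h) || (!decide (k1 h < k1 x) && decide (k2 x < k2 h))) = true := by
            apply hR; rw [hRnil]; simp
          simp [PySem.List.insertBy, this]
      · have hallF : ((g c0).all fun y => !(decide (k1 x < k1 y) || (!decide (k1 y < k1 x) && decide (k2 x < k2 y)))) = false := by
          push_neg at hall
          obtain ⟨y, hy, hlt2⟩ := hall
          apply List.all_eq_false.2
          refine ⟨y, hy, ?_⟩
          simp only [Bool.not_eq_true']
          rw [hb2 y hy]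
          simp [hlt2]
        rw [if_neg (by rw [hallF]; exact Bool.false_ne_true)]
        rw [pv_insertBy_congr _ (fun a b => decide (k2 a < k2 b)) _ _ hb2]
    · -- block c0 is strictly below x's key
      have hcx : k1 x ∈ cs' := by
        rcases List.mem_cons.1 hc with h | h
        · exact absurd h.symm hx
        · exact h
      have hlow : ∀ y ∈ g c0,
          (!(decide (k1 x < k1 y) || (!decide (k1 y < k1 x) && decide (k2 x < k2 y)))) = true := by
        intro y hy
        have h1 : k1 y = c0 := hk c0 (by simp) y hy
        have h2 : k1 y < k1 x := by rw [h1]; exact hlt _ hcx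
        simp [h2, not_lt_of_gt h2]
      rw [if_pos (List.all_eq_true.2 hlow)]
      rw [ih hp' (fun c hc => hk c (by simp [hc])) hcx]
      have : ¬ (c0 = k1 x) := hx
      simp [this]

theorem pv_insertBy_cons_pos {α : Type} (b : α → α → Bool) (x y : α) (ys : List α)
    (h : b x y = true) : PySem.List.insertBy b x (y :: ys) = x :: y :: ys := by
  simp [PySem.List.insertBy, h]

theorem pv_insertBy_cons_neg {α : Type} (b : α → α → Bool) (x y : α) (ys : List α)
    (h : b x y = false) : PySem.List.insertBy b x (y :: ys) = y :: PySem.List.insertBy b x ys := by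
  simp [PySem.List.insertBy, h]

theorem pv_ins_new {α K1 K2 : Type} [LinearOrder K1] [LinearOrder K2]
    (k1 : α → K1) (k2 : α → K2) (x : α) (cs : List K1) (g : K1 → List α)
    (hp : cs.Pairwise (· < ·))
    (hk : ∀ c ∈ cs, ∀ y ∈ g c, k1 y = c)
    (hne : ∀ c ∈ cs, g c ≠ [])
    (hc : k1 x ∉ cs) :
    PySem.List.insertBy
        (fun a b => decide (k1 a < k1 b) || (!decide (k1 b < k1 a) && decide (k2 a < k2 b)))
        x (cs.flatMap g)
      = (PySem.List.insertBy (fun a b => decide (a < b)) (k1 x) cs).flatMap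
          (fun c' => if c' = k1 x then [x] else g c') := by
  induction cs with
  | nil => simp [PySem.List.insertBy]
  | cons c0 cs' ih =>
    have hlt : ∀ c' ∈ cs', c0 < c' := (List.pairwise_cons.1 hp).1
    have hp' := (List.pairwise_cons.1 hp).2
    have hne0 : c0 ≠ k1 x := fun h => hc (by simp [h])
    by_cases hcmp : k1 x < c0
    · -- new class comes before c0: x goes to the very front
      have hfront : ∀ y ∈ (c0 :: cs').flatMap g,
          (decide (k1 x < k1 y) || (!decide (k1 y < k1 x) && decide (k2 x < k2 y))) = true := by
        intro y hy
        obtain ⟨c', hc', hyg⟩ := List.mem_flatMap.1 hy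
        have h1 : k1 y = c' := hk c' hc' y hyg
        have h2 : k1 x < k1 y := by
          rw [h1]
          rcases List.mem_cons.1 hc' with h | h
          · rw [h]; exact hcmp
          · exact lt_trans hcmp (hlt _ h)
        simp [h2]
      have hrw : (c0 :: cs').flatMap (fun c' => if c' = k1 x then [x] else g c')
          = (c0 :: cs').flatMap g := by
        apply List.flatMap_congr
        intro c' hc'
        have : c' ≠ k1 x := by
          rcases List.mem_cons.1 hc' with h | h
          · rw [h]; exact hne0
          · exact (lt_trans hcmp (hlt _ h)).ne'
        simp [this]
      obtain ⟨z, zs, hg⟩ := List.exists_cons_of_ne_nil (hne c0 (by simp))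
      rw [pv_insertBy_cons_pos _ _ _ _ (by simp [hcmp])]
      rw [List.flatMap_cons (f := fun c' => if c' = k1 x then [x] else g c'), if_pos rfl, hrw]
      have hz : (decide (k1 x < k1 z) || (!decide (k1 z < k1 x) && decide (k2 x < k2 z))) = true := by
        apply hfront
        rw [List.flatMap_cons, hg]
        simp
      rw [List.flatMap_cons, hg]
      simp only [List.cons_append]
      rw [pv_insertBy_cons_pos
            (fun a b => decide (k1 a < k1 b) || (!decide (k1 b < k1 a) && decide (k2 a < k2 b)))
            x z (zs ++ List.flatMap g cs') hz]
      simp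
    · -- c0 < k1 x: skip block c0
      have hc0lt : c0 < k1 x := lt_of_le_of_ne (le_of_not_gt hcmp) hne0
      have hlow : ∀ y ∈ g c0,
          (!(decide (k1 x < k1 y) || (!decide (k1 y < k1 x) && decide (k2 x < k2 y)))) = true := by
        intro y hy
        have h1 : k1 y = c0 := hk c0 (by simp) y hy
        have h2 : k1 y < k1 x := by rw [h1]; exact hc0lt
        simp [h2, not_lt_of_gt h2]
      rw [List.flatMap_cons, pv_insertBy_append, if_pos (List.all_eq_true.2 hlow)]
      rw [ih hp' (fun c hcm => hk c (by simp [hcm])) (fun c hcm => hne c (by simp [hcm]))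
          (fun h => hc (by simp [h]))]
      rw [pv_insertBy_cons_neg _ _ _ _ (by simpa using hcmp), List.flatMap_cons, if_neg hne0]

theorem pv_sorted_append {α K : Type} [LinearOrder K] (l : List α) (x : α) (key : α → K) :
    PySem.List.sorted (l ++ [x]) key false =
      PySem.List.insertBy (fun a b => decide (key a < key b)) x (PySem.List.sorted l key false) := by
  simp [PySem.List.sorted, List.foldl_append]

theorem pv_sorted2_append {α K1 K2 : Type} [LinearOrder K1] [LinearOrder K2]
    (l : List α) (x : α) (k1 : α → K1) (k2 : α → K2) :
    PySem.List.sorted2 (l ++ [x]) k1 k2 false =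
      PySem.List.insertBy
        (fun a b => decide (k1 a < k1 b) || (!decide (k1 b < k1 a) && decide (k2 a < k2 b)))
        x (PySem.List.sorted2 l k1 k2 false) := by
  simp [PySem.List.sorted2, List.foldl_append]

theorem pv_dedup_append_singleton {α : Type} [BEq α] [LawfulBEq α] (ys : List α) (c : α) :
    PySem.List.dedup (ys ++ [c]) =
      if c ∈ ys then PySem.List.dedup ys else PySem.List.dedup ys ++ [c] := by
  have h1 : PySem.List.dedup (ys ++ [c]) = PySem.Set.add (PySem.List.dedup ys) c := by
    simp [PySem.List.dedup, PySem.Set.ofList, List.foldl_append]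
  rw [h1]
  by_cases hc : c ∈ ys
  · have hct : (PySem.List.dedup ys).contains c = true := by simpa using hc
    simp [PySem.Set.add, hct, hc]
  · have hct : (PySem.List.dedup ys).contains c = false := by simpa using hc
    simp [PySem.Set.add, hct, hc]

theorem pv_sorted2_canonical {α K1 K2 : Type} [LinearOrder K1] [LinearOrder K2] [BEq K1] [LawfulBEq K1]
    (k1 : α → K1) (k2 : α → K2) (l : List α) :
    PySem.List.sorted2 l k1 k2 false
      = (PySem.List.sorted (PySem.List.dedup (l.map k1)) (fun c => c) false).flatMap
          (fun c => PySem.List.sorted (l.filter (fun y => decide (k1 y = c))) k2 false) := by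
  induction l using List.reverseRecOn with
  | nil => rfl
  | append_singleton l x ih =>
    have hcs_pairwise : (PySem.List.sorted (PySem.List.dedup (l.map k1)) (fun c => c) false).Pairwise (· < ·) := by
      rw [PySem.List.dedup_eq_ofList]
      exact PySem.List.sorted_ofList_pairwise_lt _
    have hmem_cs : ∀ c, c ∈ PySem.List.sorted (PySem.List.dedup (l.map k1)) (fun c => c) false ↔ c ∈ l.map k1 := by
      intro c
      rw [PySem.List.mem_sorted, PySem.List.mem_dedup]
    have hk : ∀ c ∈ PySem.List.sorted (PySem.List.dedup (l.map k1)) (fun c => c) false,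
        ∀ y ∈ PySem.List.sorted (l.filter (fun y => decide (k1 y = c))) k2 false, k1 y = c := by
      intro c _ y hy
      have := (PySem.List.mem_sorted _ _ _ _).1 hy
      have := List.of_mem_filter this
      simpa using this
    have hne : ∀ c ∈ PySem.List.sorted (PySem.List.dedup (l.map k1)) (fun c => c) false,
        PySem.List.sorted (l.filter (fun y => decide (k1 y = c))) k2 false ≠ [] := by
      intro c hc
      rw [Ne, PySem.List.sorted_eq_nil_iff]
      obtain ⟨y, hyl, hyk⟩ := List.mem_map.1 ((hmem_cs c).1 hc)
      intro hnil
      have : y ∈ l.filter (fun y => decide (k1 y = c)) := List.mem_filter.2 ⟨hyl, by simp [hyk]⟩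
      rw [hnil] at this
      simp at this
    rw [pv_sorted2_append, ih, List.map_append, List.map_singleton, pv_dedup_append_singleton]
    by_cases hmem : k1 x ∈ l.map k1
    · rw [if_pos hmem]
      rw [pv_ins_mem k1 k2 x _ _ hcs_pairwise hk ((hmem_cs (k1 x)).2 hmem)]
      apply List.flatMap_congr
      intro c hc
      by_cases hcx : c = k1 x
      · rw [if_pos hcx, List.filter_append]
        have : List.filter (fun y => decide (k1 y = c)) [x] = [x] := by simp [hcx]
        rw [this, pv_sorted_append]
      · rw [if_neg hcx, List.filter_append]
        have : List.filter (fun y => decide (k1 y = c)) [x] = [] := by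
          simp; intro h; exact hcx h.symm
        rw [this, List.append_nil]
    · rw [if_neg hmem]
      rw [pv_ins_new k1 k2 x _ _ hcs_pairwise hk hne (fun h => hmem ((hmem_cs (k1 x)).1 h))]
      rw [pv_sorted_append]
      have hid : (fun (a b : K1) => decide ((fun c => c) a < (fun c => c) b)) = fun a b => decide (a < b) := rfl
      apply List.flatMap_congr
      intro c hc
      by_cases hcx : c = k1 x
      · rw [if_pos hcx, List.filter_append]
        have h1 : List.filter (fun y => decide (k1 y = c)) l = [] := by
          rw [List.filter_eq_nil_iff]
          intro y hy hdec
          apply hmem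
          rw [hcx] at hdec
          have : k1 y = k1 x := by simpa using hdec
          exact this ▸ List.mem_map_of_mem hy
        have h2 : List.filter (fun y => decide (k1 y = c)) [x] = [x] := by simp [hcx]
        rw [h1, h2]
        rfl
      · rw [if_neg hcx, List.filter_append]
        have : List.filter (fun y => decide (k1 y = c)) [x] = [] := by
          simp; intro h; exact hcx h.symm
        rw [this, List.append_nil]

theorem pv_sorted_congr_key {α K : Type} [LinearOrder K] (l : List α) (key key' : α → K)
    (h : ∀ y ∈ l, key y = key' y) :
    PySem.List.sorted l key false = PySem.List.sorted l key' false := by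
  induction l using List.reverseRecOn with
  | nil => rfl
  | append_singleton l x ih =>
    rw [pv_sorted_append, pv_sorted_append, ih (fun y hy => h y (by simp [hy]))]
    exact pv_insertBy_congr _ _ _ _ (fun y hy => by
      have hyl : y ∈ l := (PySem.List.mem_sorted _ _ _ _).1 hy
      rw [h x (by simp), h y (by simp [hyl])])

theorem pv_insertBy_map {α β : Type} (b : β → β → Bool) (b' : α → α → Bool) (f : α → β)
    (x : α) (ys : List α) (h : ∀ y, b (f x) (f y) = b' x y) :
    PySem.List.insertBy b (f x) (ys.map f) = (PySem.List.insertBy b' x ys).map f := by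
  induction ys with
  | nil => rfl
  | cons y ys ih =>
    by_cases hb : b' x y
    · simp [PySem.List.insertBy, h y, hb]
    · simp [PySem.List.insertBy, h y, hb, ih]

theorem pv_sorted_map {α β K : Type} [LinearOrder K] (l : List α) (f : α → β) (key : β → K) :
    PySem.List.sorted (l.map f) key false =
      (PySem.List.sorted l (fun y => key (f y)) false).map f := by
  induction l using List.reverseRecOn with
  | nil => rfl
  | append_singleton l x ih =>
    rw [List.map_append, List.map_singleton, pv_sorted_append, pv_sorted_append, ih]
    exact pv_insertBy_map _ _ _ _ _ (fun y => rfl)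

theorem pv_sorted_eq_self_of_const_key {α K : Type} [LinearOrder K] (l : List α) (key : α → K)
    (k : K) (h : ∀ y ∈ l, key y = k) :
    PySem.List.sorted l key false = l := by
  apply PySem.List.sorted_eq_self_of_pairwise
  exact List.pairwise_of_forall_mem_list (fun a ha b hb => by rw [h a ha, h b hb])

theorem pv_sorted_eq_sorted2_self {α K : Type} [LinearOrder K] (l : List α) (key : α → K) :
    PySem.List.sorted l key false = PySem.List.sorted2 l key key false := by
  have hfun : (fun (a b : α) => decide (key a < key b))
      = fun a b => decide (key a < key b) || (!decide (key b < key a) && decide (key a < key b)) := by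
    funext a b
    by_cases h : key a < key b <;> simp [h]
  simp only [PySem.List.sorted, PySem.List.sorted2]
  rw [hfun]
  simp

theorem pv_sorted_canonical {α K : Type} [LinearOrder K] [BEq K] [LawfulBEq K]
    (key : α → K) (l : List α) :
    PySem.List.sorted l key false
      = (PySem.List.sorted (PySem.List.dedup (l.map key)) (fun c => c) false).flatMap
          (fun c => l.filter (fun y => decide (key y = c))) := by
  rw [pv_sorted_eq_sorted2_self, pv_sorted2_canonical]
  apply List.flatMap_congr
  intro c _
  exact pv_sorted_eq_self_of_const_key _ _ c (fun y hy => by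
    have := List.of_mem_filter hy
    simpa using this)

theorem pv_flatMap_filter {α K : Type} [LinearOrder K] (key : α → K) (l : List α) (k : K)
    (cs : List K) (hnd : cs.Nodup) :
    (cs.flatMap (fun c => l.filter (fun y => decide (key y = c)))).filter
        (fun y => decide (key y = k))
      = if k ∈ cs then l.filter (fun y => decide (key y = k)) else [] := by
  induction cs with
  | nil => simp
  | cons c cs ih =>
    rw [List.flatMap_cons, List.filter_append, ih (List.nodup_cons.1 hnd).2]
    by_cases hck : c = k
    · have h1 : (l.filter (fun y => decide (key y = c))).filter (fun y => decide (key y = k))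
          = l.filter (fun y => decide (key y = k)) := by
        rw [hck]
        rw [List.filter_filter]
        simp
      have h2 : k ∉ cs := hck ▸ (List.nodup_cons.1 hnd).1
      rw [h1, if_neg h2, if_pos (by simp [hck])]
      simp
    · have h1 : (l.filter (fun y => decide (key y = c))).filter (fun y => decide (key y = k)) = [] := by
        rw [List.filter_filter, List.filter_eq_nil_iff]
        intro y _
        simp
        intro h hk2
        exact hck (h ▸ hk2 ▸ rfl)
      rw [h1]
      by_cases hk : k ∈ cs
      · rw [if_pos hk, if_pos (by simp [hk])]
        simp
      · rw [if_neg hk, if_neg (by simp [hck, hk]; exact fun h => hck h.symm)]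
        simp
theorem pv_filter_sorted_key {α K : Type} [LinearOrder K] [BEq K] [LawfulBEq K]
    (key : α → K) (l : List α) (k : K) :
    (PySem.List.sorted l key false).filter (fun y => decide (key y = k))
      = l.filter (fun y => decide (key y = k)) := by
  rw [pv_sorted_canonical]
  have hnd : (PySem.List.sorted (PySem.List.dedup (l.map key)) (fun c => c) false).Nodup := by
    rw [(PySem.List.sorted_perm _ _ _).nodup_iff]
    rw [PySem.List.dedup_eq_ofList]
    exact PySem.Set.nodup_ofList _
  rw [pv_flatMap_filter key l k _ hnd]
  by_cases hk : k ∈ PySem.List.sorted (PySem.List.dedup (l.map key)) (fun c => c) false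
  · rw [if_pos hk]
  · rw [if_neg hk]
    have hnm : k ∉ l.map key := by
      intro h
      exact hk ((PySem.List.mem_sorted _ _ _ _).2 ((PySem.List.mem_dedup _ _).2 h))
    rw [eq_comm, List.filter_eq_nil_iff]
    intro y hy
    simp
    intro h
    exact hnm (h ▸ List.mem_map_of_mem hy)

theorem pv_runs_flatMap (cs : List String)
    (g : String → List (Int × String × String × String × String × String × String))
    (hp : cs.Pairwise (· < ·))
    (hk : ∀ c ∈ cs, ∀ y ∈ g c, y.2.1 = c)
    (hne : ∀ c ∈ cs, g c ≠ []) :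
    pvRuns (cs.flatMap g) = cs.map (fun c => (c, g c)) := by
  induction cs with
  | nil => simp [pvRuns]
  | cons c0 cs' ih =>
    have hlt : ∀ c' ∈ cs', c0 < c' := (List.pairwise_cons.1 hp).1
    obtain ⟨z, zs, hg⟩ := List.exists_cons_of_ne_nil (hne c0 (by simp))
    have hz : z.2.1 = c0 := hk c0 (by simp) z (by simp [hg])
    have hzs : ∀ y ∈ zs, (y.2.1 == z.2.1) = true := by
      intro y hy
      have : y.2.1 = c0 := hk c0 (by simp) y (by simp [hg, hy])
      simp [this, hz]
    have hrest : ∀ y ∈ cs'.flatMap g, (y.2.1 == z.2.1) = false := by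
      intro y hy
      obtain ⟨c', hc', hyg⟩ := List.mem_flatMap.1 hy
      have h1 : y.2.1 = c' := hk c' (by simp [hc']) y hyg
      have h2 : c' ≠ c0 := (hlt c' hc').ne'
      simp [h1, hz, h2]
    rw [List.flatMap_cons, hg, List.cons_append, pvRuns]
    have h0 : (cs'.flatMap g).takeWhile (fun y => y.2.1 == z.2.1) = []
        ∧ (cs'.flatMap g).dropWhile (fun y => y.2.1 == z.2.1) = cs'.flatMap g := by
      cases hfm : cs'.flatMap g with
      | nil => simp
      | cons h t =>
        have hh := hrest h (by simp [hfm])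
        constructor
        · simp [List.takeWhile_cons, hh]
        · simp [List.dropWhile_cons, hh]
    have htw : (zs ++ cs'.flatMap g).takeWhile (fun y => y.2.1 == z.2.1) = zs := by
      rw [List.takeWhile_append, List.takeWhile_eq_self_iff.2 hzs, if_pos rfl, h0.1, List.append_nil]
    have hdw : (zs ++ cs'.flatMap g).dropWhile (fun y => y.2.1 == z.2.1) = cs'.flatMap g := by
      rw [List.dropWhile_append, List.dropWhile_eq_nil_iff.2 (fun y hy => hzs y hy)]
      simp only [List.isEmpty_nil, if_pos]
      exact h0.2
    rw [htw, hdw, hz]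
    rw [ih (List.pairwise_cons.1 hp).2 (fun c hc => hk c (by simp [hc])) (fun c hc => hne c (by simp [hc]))]
    simp [hg]

def pvToName (y : Int × String × String × String × String × String × String) :
    String × String × String × String × String × String × String :=
  (pvRm.getD y.1 "", y.2)

def pvRowKey (r : String × String × String × String × String × String × String) : Int :=
  pvWm.getD r.1 0

def pvValidName (s : String) : Prop :=
  s = "Montag" ∨ s = "Dienstag" ∨ s = "Mittwoch" ∨ s = "Donnerstag" ∨ s = "Freitag"

theorem pv_rt1 (s : String) (h : pvValidName s) : pvRm.getD (pvWm.getD s 0) "" = s := by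
  rcases h with h | h | h | h | h <;> subst h <;> rfl

theorem pv_day5 (s : String) (h : pvValidName s) :
    pvWm.getD s 0 = 1 ∨ pvWm.getD s 0 = 2 ∨ pvWm.getD s 0 = 3 ∨ pvWm.getD s 0 = 4 ∨ pvWm.getD s 0 = 5 := by
  rcases h with h | h | h | h | h <;> subst h <;> decide

theorem pv_rt2 (y : Int × String × String × String × String × String × String)
    (h : y.1 = 1 ∨ y.1 = 2 ∨ y.1 = 3 ∨ y.1 = 4 ∨ y.1 = 5) :
    pvRowKey (pvToName y) = y.1 := by
  rcases h with h | h | h | h | h <;> rw [pvRowKey, pvToName, h] <;> rfl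

theorem pv_foldl_skip {α β : Type} (q : α → Bool) (f : α → β) (l : List α) (a : List β) :
    l.foldl (fun acc x => if q x then acc else acc ++ [f x]) a
      = a ++ (l.filter (fun x => !q x)).map f := by
  induction l generalizing a with
  | nil => simp
  | cons x xs ih =>
    cases hq : q x <;> simp [List.foldl_cons, hq, ih]

theorem pv_contains_congr (X Y : List String) (h : ∀ d, d ∈ X ↔ d ∈ Y) (d : String) :
    (PySem.Set.ofList X).contains d = (PySem.Set.ofList Y).contains d := by
  by_cases hd : d ∈ X
  · have h1 : (PySem.Set.ofList X).contains d = true := by simpa using hd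
    have h2 : (PySem.Set.ofList Y).contains d = true := by simpa using (h d).1 hd
    rw [h1, h2]
  · have h1 : (PySem.Set.ofList X).contains d = false := by simpa using hd
    have h2 : (PySem.Set.ofList Y).contains d = false := by
      simpa using fun hy => hd ((h d).2 hy)
    rw [h1, h2]

theorem pv_sorted_name_eq (ac : List (Int × String × String × String × String × String × String))
    (hday : ∀ y ∈ ac, y.1 = 1 ∨ y.1 = 2 ∨ y.1 = 3 ∨ y.1 = 4 ∨ y.1 = 5) :
    PySem.List.sorted (ac.map pvToName) (fun r => pvWm.getD r.1 0) false
      = (PySem.List.sorted ac (fun x => x.1) false).map pvToName := by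
  rw [pv_sorted_map]
  congr 1
  apply pv_sorted_congr_key
  intro y hy
  exact pv_rt2 y (hday y hy)

theorem pv_filter_name (ac : List (Int × String × String × String × String × String × String))
    (hday : ∀ y ∈ ac, y.1 = 1 ∨ y.1 = 2 ∨ y.1 = 3 ∨ y.1 = 4 ∨ y.1 = 5) (k : Int) :
    ((PySem.List.sorted ac (fun x => x.1) false).map pvToName).filter
        (fun r => decide (pvWm.getD r.1 0 = k))
      = (ac.map pvToName).filter (fun r => decide (pvWm.getD r.1 0 = k)) := by
  rw [List.filter_map, List.filter_map]
  congr 1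
  have hc1 : ∀ y ∈ PySem.List.sorted ac (fun x => x.1) false,
      ((fun r => decide (pvWm.getD r.1 0 = k)) ∘ pvToName) y = decide (y.1 = k) := by
    intro y hy
    have := pv_rt2 y (hday y ((PySem.List.mem_sorted _ _ _ _).1 hy))
    simp only [Function.comp]
    rw [show pvWm.getD (pvToName y).1 0 = pvRowKey (pvToName y) from rfl, this]
  have hc2 : ∀ y ∈ ac, ((fun r => decide (pvWm.getD r.1 0 = k)) ∘ pvToName) y = decide (y.1 = k) := by
    intro y hy
    have := pv_rt2 y (hday y hy)
    simp only [Function.comp]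
    rw [show pvWm.getD (pvToName y).1 0 = pvRowKey (pvToName y) from rfl, this]
  rw [List.filter_congr hc1, List.filter_congr hc2]
  exact pv_filter_sorted_key (fun x => x.1) ac k

theorem pv_sorted_fill_eq (G B F : List (String × String × String × String × String × String × String))
    (hmem : ∀ r, r ∈ G ↔ r ∈ B)
    (hfil : ∀ k : Int, G.filter (fun r => decide (pvWm.getD r.1 0 = k))
      = B.filter (fun r => decide (pvWm.getD r.1 0 = k))) :
    PySem.List.sorted (G ++ F) (fun r => pvWm.getD r.1 0) false
      = PySem.List.sorted (B ++ F) (fun r => pvWm.getD r.1 0) false := by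
  rw [pv_sorted_canonical (fun r => pvWm.getD r.1 0) (G ++ F),
      pv_sorted_canonical (fun r => pvWm.getD r.1 0) (B ++ F)]
  have hmemk : ∀ k, (k ∈ (G ++ F).map (fun r => pvWm.getD r.1 0))
      ↔ k ∈ (B ++ F).map (fun r => pvWm.getD r.1 0) := by
    intro k
    simp only [List.map_append, List.mem_append, List.mem_map]
    constructor
    · rintro (⟨r, hr, rfl⟩ | h)
      · exact Or.inl ⟨r, (hmem r).1 hr, rfl⟩
      · exact Or.inr h
    · rintro (⟨r, hr, rfl⟩ | h)
      · exact Or.inl ⟨r, (hmem r).2 hr, rfl⟩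
      · exact Or.inr h
  have hnd1 : (PySem.List.dedup ((G ++ F).map (fun r => pvWm.getD r.1 0))).Nodup := by
    rw [PySem.List.dedup_eq_ofList]; exact PySem.Set.nodup_ofList _
  have hnd2 : (PySem.List.dedup ((B ++ F).map (fun r => pvWm.getD r.1 0))).Nodup := by
    rw [PySem.List.dedup_eq_ofList]; exact PySem.Set.nodup_ofList _
  have hcs : PySem.List.sorted (PySem.List.dedup ((G ++ F).map (fun r => pvWm.getD r.1 0))) (fun c => c) false
      = PySem.List.sorted (PySem.List.dedup ((B ++ F).map (fun r => pvWm.getD r.1 0))) (fun c => c) false := by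
    apply PySem.List.sorted_eq_sorted_of_perm _ _ _ (fun a b h => h)
    rw [List.perm_ext_iff_of_nodup hnd1 hnd2]
    intro k
    rw [PySem.List.mem_dedup, PySem.List.mem_dedup]
    exact hmemk k
  rw [hcs]
  apply List.flatMap_congr
  intro k _
  rw [List.filter_append, List.filter_append, hfil k]

theorem pv_perclass (c : String) (ac : List (Int × String × String × String × String × String × String))
    (hday : ∀ y ∈ ac, y.1 = 1 ∨ y.1 = 2 ∨ y.1 = 3 ∨ y.1 = 4 ∨ y.1 = 5) :
    pvFinishA c (PySem.List.sorted ac (fun x => x.1) false)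
      = PySem.List.sorted
          (if (ac.map pvToName).length < 5 then
             pvWm.keys.foldl
               (fun acc day =>
                 if PySem.Set.contains (PySem.Set.ofList ((ac.map pvToName).map (fun r => r.1))) day then acc
                 else acc ++ [(day, c, "", "", "", "", "")])
               (ac.map pvToName)
           else ac.map pvToName)
          (fun r => pvWm.getD r.1 0) false := by
  have hmap : (PySem.List.sorted ac (fun x => x.1) false).map (fun g => (pvRm.getD g.1 "", g.2))
      = (PySem.List.sorted ac (fun x => x.1) false).map pvToName := rfl
  have hlen1 : ((PySem.List.sorted ac (fun x => x.1) false).map pvToName).length = ac.length := by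
    simp [PySem.List.length_sorted]
  have hlen2 : (ac.map pvToName).length = ac.length := by simp
  simp only [pvFinishA]
  rw [hmap]
  by_cases h5 : ac.length < 5
  · rw [if_pos (by rw [hlen1]; exact h5), if_pos (by rw [hlen2]; exact h5)]
    rw [PySem.List.foldl_append_singleton_eq_map]
    rw [pv_foldl_skip]
    have hkeys : PySem.Set.ofList pvWm.keys = pvWm.keys := by decide
    have hdiff : PySem.Set.diff (PySem.Set.ofList pvWm.keys)
          (PySem.Set.ofList (((PySem.List.sorted ac (fun x => x.1) false).map pvToName).map (fun e => e.1)))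
        = pvWm.keys.filter (fun d =>
            !(PySem.Set.ofList (((PySem.List.sorted ac (fun x => x.1) false).map pvToName).map (fun e => e.1))).contains d) := by
      rw [PySem.Set.diff, hkeys]
    rw [hdiff]
    have hfill : pvWm.keys.filter (fun d =>
            !(PySem.Set.ofList (((PySem.List.sorted ac (fun x => x.1) false).map pvToName).map (fun e => e.1))).contains d)
        = pvWm.keys.filter (fun d =>
            !(PySem.Set.ofList ((ac.map pvToName).map (fun r => r.1))).contains d) := by
      apply List.filter_congr
      intro d _
      have := pv_contains_congr
        (((PySem.List.sorted ac (fun x => x.1) false).map pvToName).map (fun e => e.1))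
        ((ac.map pvToName).map (fun r => r.1))
        (by intro x; simp [List.mem_map, PySem.List.mem_sorted]) d
      rw [this]
    rw [hfill]
    exact pv_sorted_fill_eq _ _ _
      (by intro r; simp [List.mem_map, PySem.List.mem_sorted])
      (fun k => pv_filter_name ac hday k)
  · rw [if_neg (by rw [hlen1]; exact h5), if_neg (by rw [hlen2]; exact h5)]
    exact (pv_sorted_name_eq ac hday).symm

theorem pv_beq_decide (a b : String) : (a == b) = decide (a = b) := by
  by_cases h : a = b <;> simp [h]

theorem pv_main (td : List (String × String × String × String × String × String × String × String))
    (hpre : ∀ e ∈ td, pvValidName e.2.1) :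
    sort_timetable_data td = sort_timetable_data_alt td := by
  simp only [sort_timetable_data, sort_timetable_data_alt]
  -- shared names
  have hcsmap : (td.map (fun e => (pvWm.getD e.2.1 0, e.2.2))).map (fun x : Int × String × String × String × String × String × String => x.2.1)
      = td.map (fun e => e.2.2.1) := by
    rw [List.map_map]; rfl
  -- ===== A side =====
  rw [pv_sorted2_canonical
        (fun x : Int × String × String × String × String × String × String => x.2.1)
        (fun x : Int × String × String × String × String × String × String => x.1)
        (td.map (fun e => (pvWm.getD e.2.1 0, e.2.2)))]
  have hp : (PySem.List.sorted (PySem.List.dedup ((td.map (fun e => (pvWm.getD e.2.1 0, e.2.2))).map (fun x => x.2.1))) (fun c => c) false).Pairwise (· < ·) := by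
    rw [PySem.List.dedup_eq_ofList]
    exact PySem.List.sorted_ofList_pairwise_lt _
  have hmem_cs : ∀ c, c ∈ PySem.List.sorted (PySem.List.dedup ((td.map (fun e => (pvWm.getD e.2.1 0, e.2.2))).map (fun x => x.2.1))) (fun c => c) false
      ↔ c ∈ td.map (fun e => e.2.2.1) := by
    intro c
    rw [PySem.List.mem_sorted, PySem.List.mem_dedup, hcsmap]
  have hk : ∀ c ∈ PySem.List.sorted (PySem.List.dedup ((td.map (fun e => (pvWm.getD e.2.1 0, e.2.2))).map (fun x => x.2.1))) (fun c => c) false,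
      ∀ y ∈ PySem.List.sorted ((td.map (fun e => (pvWm.getD e.2.1 0, e.2.2))).filter (fun y => decide (y.2.1 = c))) (fun x => x.1) false, y.2.1 = c := by
    intro c _ y hy
    have := List.of_mem_filter ((PySem.List.mem_sorted _ _ _ _).1 hy)
    simpa using this
  have hne : ∀ c ∈ PySem.List.sorted (PySem.List.dedup ((td.map (fun e => (pvWm.getD e.2.1 0, e.2.2))).map (fun x => x.2.1))) (fun c => c) false,
      PySem.List.sorted ((td.map (fun e => (pvWm.getD e.2.1 0, e.2.2))).filter (fun y => decide (y.2.1 = c))) (fun x => x.1) false ≠ [] := by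
    intro c hc
    rw [Ne, PySem.List.sorted_eq_nil_iff]
    have : c ∈ (td.map (fun e => (pvWm.getD e.2.1 0, e.2.2))).map (fun x => x.2.1) := by
      rw [hcsmap]; exact (hmem_cs c).1 hc
    obtain ⟨y, hyl, hyk⟩ := List.mem_map.1 this
    intro hnil
    have : y ∈ (td.map (fun e => (pvWm.getD e.2.1 0, e.2.2))).filter (fun y => decide (y.2.1 = c)) :=
      List.mem_filter.2 ⟨hyl, by simp [hyk]⟩
    rw [hnil] at this
    simp at this
  rw [pv_runs_flatMap _ _ hp hk hne]
  rw [PySem.List.foldl_append_singleton_eq_map, List.map_map, List.nil_append]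
  -- ===== B side =====
  have hfold : td.foldl (fun d e => d.modify e.2.2.1 [] (fun l => l ++ [(e.2.1, e.2.2)])) PySem.Dict.empty
      = (td.map (fun e => (e.2.2.1, (e.2.1, e.2.2)))).foldl
          (fun d p => d.modify p.1 [] (fun l => l ++ [p.2])) PySem.Dict.empty :=
    by rw [List.foldl_map]
  have hkeys : (td.foldl (fun d e => d.modify e.2.2.1 [] (fun l => l ++ [(e.2.1, e.2.2)])) PySem.Dict.empty).keys
      = PySem.Set.ofList (td.map (fun e => e.2.2.1)) := by
    rw [PySem.Dict.keys_foldl_modify_key td (fun e => e.2.2.1) [] (fun _ e => fun l => l ++ [(e.2.1, e.2.2)]) PySem.Dict.empty]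
    rfl
  have hgetD : ∀ c, (td.foldl (fun d e => d.modify e.2.2.1 [] (fun l => l ++ [(e.2.1, e.2.2)])) PySem.Dict.empty).getD c []
      = (td.filter (fun e => decide (e.2.2.1 = c))).map (fun e => (e.2.1, e.2.2)) := by
    intro c
    rw [hfold, PySem.Dict.getD_foldl_modify_append]
    rw [show PySem.Dict.empty.getD c ([] : List (String × String × String × String × String × String × String)) = [] from rfl]
    rw [List.nil_append, List.filter_map, List.map_map]
    have : (fun (p : String × String × String × String × String × String × String × String) => p.1 == c) ∘ (fun e => (e.2.2.1, (e.2.1, e.2.2))) = fun (e : String × String × String × String × String × String × String × String) => e.2.2.1 == c := rfl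
    rw [this, List.filter_congr (fun e _ => pv_beq_decide e.2.2.1 c)]
    rfl
  have hcsB : PySem.List.sorted (td.foldl (fun d e => d.modify e.2.2.1 [] (fun l => l ++ [(e.2.1, e.2.2)])) PySem.Dict.empty).keys (fun k => k) false
      = PySem.List.sorted (PySem.List.dedup ((td.map (fun e => (pvWm.getD e.2.1 0, e.2.2))).map (fun x => x.2.1))) (fun c => c) false := by
    rw [hkeys, hcsmap, PySem.List.dedup_eq_ofList]
  rw [hcsB]
  rw [PySem.List.foldl_append_singleton_eq_map, List.nil_append]
  -- ===== per class =====
  apply List.map_congr_left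
  intro c hc
  have hday : ∀ y ∈ (td.map (fun e => (pvWm.getD e.2.1 0, e.2.2))).filter (fun y => decide (y.2.1 = c)),
      y.1 = 1 ∨ y.1 = 2 ∨ y.1 = 3 ∨ y.1 = 4 ∨ y.1 = 5 := by
    intro y hy
    obtain ⟨e, he, hfe⟩ := List.mem_map.1 (List.mem_of_mem_filter hy)
    rw [← hfe]
    exact pv_day5 e.2.1 (hpre e he)
  have hbc : (td.foldl (fun d e => d.modify e.2.2.1 [] (fun l => l ++ [(e.2.1, e.2.2)])) PySem.Dict.empty).getD c []
      = ((td.map (fun e => (pvWm.getD e.2.1 0, e.2.2))).filter (fun y => decide (y.2.1 = c))).map pvToName := by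
    rw [hgetD c, List.filter_map, List.map_map]
    have hpred : (fun (y : Int × String × String × String × String × String × String) => decide (y.2.1 = c)) ∘ (fun e => (pvWm.getD e.2.1 0, e.2.2))
        = fun (e : String × String × String × String × String × String × String × String) => decide (e.2.2.1 = c) := rfl
    rw [hpred]
    apply List.map_congr_left
    intro e he
    have hv := hpre e (List.mem_of_mem_filter he)
    show (e.2.1, e.2.2) = pvToName (pvWm.getD e.2.1 0, e.2.2)
    rw [pvToName]
    simp only [pv_rt1 e.2.1 hv]
  rw [hbc]
  exact pv_perclass c _ hday

-- ===== VERDICT (by name: the statement is the Claim_ definition above) =====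
theorem sort_timetable_data_spec : Claim_equal_sort_timetable_data := by
  intro td _ hpre
  unfold Spec_sort_timetable_data
  exact pv_main td hpre
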